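-- pv_equiv track=rewrite | github.com/paulsignorelli/simple-sql-parser | parse_sql_final.py | extract_subqueries
-- ===== SOURCE A (Python) =====
-- def extract_subqueries(query: str):
--     subqueries = []
--
--     def replace_subqueries(q: str) -> str:
--         output = ""
--         i = 0
--         n = len(q)
--         while i < n:
--             c = q[i]
--             if c == '(':
--                 depth = 1
--                 start = i
--                 i += 1
--                 while i < n and depth > 0:
--                     if q[i] == '(':
--                         depth += 1
--                     elif q[i] == ')':
--                         depth -= 1
--                     i += 1
--                 content = q[start+1:i-1]
--                 rewritten = replace_subqueries(content)
--                 select_idx = content.lower().find("select")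
--                 if select_idx != -1:
--                     select_part = content[select_idx:]
--                     prefix = content[:select_idx]
--                     subqueries.append(select_part)
--                     placeholder = f"<<subquery_{len(subqueries)}>>"
--                     output += f"{prefix}{placeholder}"
--                 else:
--                     output += f"({rewritten})"
--             else:
--                 output += c
--                 i += 1
--         return output
--
--     new_query = replace_subqueries(query)
--     return new_query, subqueries
-- ===== SOURCE B (Python) =====
-- def extract_subqueries(query: str):
--     # One left-to-right pass with an explicit frame stack; each frame keeps the
--     # rewritten output and the raw text of its parenthesized block.
--     subqueries = []
--     cur_out, cur_raw = "", ""
--     stack = []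
--     for c in query:
--         if c == '(':
--             stack.append((cur_out, cur_raw))
--             cur_out, cur_raw = "", ""
--         elif c == ')' and stack:
--             p_out, p_raw = stack.pop()
--             idx = cur_raw.lower().find("select")
--             if idx != -1:
--                 subqueries.append(cur_raw[idx:])
--                 cur_out = p_out + cur_raw[:idx] + f"<<subquery_{len(subqueries)}>>"
--             else:
--                 cur_out = p_out + "(" + cur_out + ")"
--             cur_raw = p_raw + "(" + cur_raw + ")"
--         else:
--             cur_out += c
--             cur_raw += c
--     while stack:  # unmatched '(' : keep the text as written
--         p_out, _ = stack.pop()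
--         cur_out = p_out + "(" + cur_out
--     return cur_out, subqueries
-- ===== Notes on version B (the rewrite author's own statement) =====
-- stated objective: faster
-- what changed: A re-scans every parenthesized block: it first skips to the matching ')' with a depth counter and then recursively re-processes the extracted content, so nested parens are scanned once per nesting level; B is a single left-to-right pass with an explicit stack of (rewritten, raw) frames, visiting each character once.
-- intended difference: On queries containing an unmatched '(' , A silently drops the last character of each unclosed level and invents a closing paren (e.g. '(' -> ('()', []) and '(x' -> ('()', [])), corrupting the text and the extracted subqueries; B leaves the unmatched text as written ('(' -> ('(', [])), which is the intended value. — e.g. on extract_subqueries("("): A returns ("()", []), B returns ("(", [])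
import Mathlib
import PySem

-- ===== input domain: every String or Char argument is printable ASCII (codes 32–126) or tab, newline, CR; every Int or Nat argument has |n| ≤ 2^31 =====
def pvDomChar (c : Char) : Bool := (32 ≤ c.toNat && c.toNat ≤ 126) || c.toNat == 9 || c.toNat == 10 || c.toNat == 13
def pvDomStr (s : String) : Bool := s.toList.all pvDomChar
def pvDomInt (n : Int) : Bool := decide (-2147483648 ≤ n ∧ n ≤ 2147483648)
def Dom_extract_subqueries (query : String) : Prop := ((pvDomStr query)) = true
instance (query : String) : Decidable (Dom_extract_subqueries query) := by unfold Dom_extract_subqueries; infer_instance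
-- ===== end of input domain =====

set_option maxRecDepth 10000

-- B is a single left-to-right pass with an explicit frame stack instead of A's re-scanning
-- recursion (objective: faster on nested parentheses); on queries with an unmatched '(' the
-- two differ, see D_extract_subqueries below.

-- ===== PORT A =====

-- tiny named termination facts (cited by the ports' decreasing_by; keeps the
-- compiled recursion bodies small)
theorem pv_sub_succ_lt {n i : Nat} (h : i < n) : n - (i + 1) < n - i := by omega

-- while i < n and depth > 0: inspect q[i], adjust depth, i += 1.
-- The fuel argument only makes the loop structurally total: it advances i each
-- step, so q.length - i steps always suffice (aFind below passes exactly that).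
def aFindF : Nat → List Char → Nat → Int → Nat
  | 0, _, i, _ => i
  | fuel + 1, q, i, depth =>
    if h : i < q.length ∧ 0 < depth then
      aFindF fuel q (i + 1)
        (if q[i] = '(' then depth + 1 else if q[i] = ')' then depth - 1 else depth)
    else i

def aFind (q : List Char) (i : Nat) (depth : Int) : Nat := aFindF (q.length - i) q i depth

theorem le_aFindF : ∀ (fuel : Nat) (q : List Char) (i : Nat) (d : Int), i ≤ aFindF fuel q i d := by
  intro fuel
  induction fuel with
  | zero => intro q i d; exact Nat.le_refl i
  | succ n ih =>
    intro q i d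
    rw [aFindF]
    by_cases h : i < q.length ∧ 0 < d
    · rw [dif_pos h]
      exact Nat.le_trans (Nat.le_succ i) (ih q (i + 1) _)
    · rw [dif_neg h]

theorem le_aFind (q : List Char) (i : Nat) (depth : Int) : i ≤ aFind q i depth :=
  le_aFindF _ q i depth

theorem pv_take_drop_lt {q : List Char} {i : Nat} (k : Nat) (h : i < q.length) :
    ((q.drop (i + 1)).take k).length < q.length := by
  simp only [List.length_take, List.length_drop]
  omega

theorem pv_find_sub_lt {q : List Char} {i : Nat} (h : i < q.length) :
    q.length - aFind q (i + 1) 1 < q.length - i := by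
  have := le_aFind q (i + 1) 1
  omega

-- the closure `replace_subqueries` threading the mutable `subqueries` list;
-- output and the scanned string are kept as List Char (Python str on the ASCII domain)
def aRun (q : List Char) (i : Nat) (output : List Char) (subs : List String) :
    List Char × List String :=
  if h : i < q.length then
    let c := q[i]
    if c = '(' then
      let start := i
      let i2 := aFind q (i + 1) 1
      -- q[start+1 : i2-1]: both bounds nonnegative (i2 ≥ start+1), Nat drop/take clamps
      -- exactly as the Python slice does here
      let content := (q.drop (start + 1)).take (i2 - 1 - (start + 1))
      let r := aRun content 0 [] subs
      let sidx := PySem.Chars.find (PySem.Chars.lower content) "select".toList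
      if sidx ≠ -1 then
        let select_part := PySem.List.slice content (some sidx) none
        let pre := PySem.List.slice content none (some sidx)
        let subs2 := r.2 ++ [String.ofList select_part]
        let placeholder :=
          "<<subquery_".toList ++ PySem.Int.toChars (subs2.length : Int) ++ ">>".toList
        aRun q i2 (output ++ pre ++ placeholder) subs2
      else
        aRun q i2 (output ++ '(' :: r.1 ++ [')']) r.2
    else
      aRun q (i + 1) (output ++ [c]) subs
  else (output, subs)
termination_by (q.length, q.length - i)
decreasing_by
  · exact Prod.Lex.left _ _ (pv_take_drop_lt _ h)
  · exact Prod.Lex.right _ (pv_find_sub_lt h)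
  · exact Prod.Lex.right _ (pv_find_sub_lt h)
  · exact Prod.Lex.right _ (pv_sub_succ_lt h)

def extract_subqueries (query : String) : String × List String :=
  let r := aRun query.toList 0 [] []
  (String.ofList r.1, r.2)

-- ===== PORT B =====

-- collapse of the leftover stack at end of input (unmatched '(' kept literally)
def bFinish (out : List Char) (stack : List (List Char × List Char)) : List Char :=
  match stack with
  | [] => out
  | p :: st => bFinish (p.1 ++ '(' :: out) st

-- one pass; each frame carries (rewritten output, raw text) of its open block
def bRun (cs : List Char) (cur : List Char × List Char)
    (stack : List (List Char × List Char)) (subs : List String) :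
    List Char × List String :=
  match cs with
  | [] => (bFinish cur.1 stack, subs)
  | c :: rest =>
    if c = '(' then
      bRun rest ([], []) (cur :: stack) subs
    else if c = ')' then
      match stack with
      | [] => bRun rest (cur.1 ++ [c], cur.2 ++ [c]) [] subs
      | p :: st =>
        let sidx := PySem.Chars.find (PySem.Chars.lower cur.2) "select".toList
        let raw' := p.2 ++ '(' :: cur.2 ++ [')']
        if sidx ≠ -1 then
          let subs2 := subs ++ [String.ofList (PySem.List.slice cur.2 (some sidx) none)]
          bRun rest
            (p.1 ++ PySem.List.slice cur.2 none (some sidx) ++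
               "<<subquery_".toList ++ PySem.Int.toChars (subs2.length : Int) ++ ">>".toList,
             raw') st subs2
        else
          bRun rest (p.1 ++ '(' :: cur.1 ++ [')'], raw') st subs
    else
      bRun rest (cur.1 ++ [c], cur.2 ++ [c]) stack subs

def extract_subqueries_alt (query : String) : String × List String :=
  let r := bRun query.toList ([], []) [] []
  (String.ofList r.1, r.2)

-- ===== PRECONDITION & SPEC =====

-- On queries containing an unmatched '(', A silently drops the last character of each
-- unclosed level and invents a closing paren (e.g. "(" ↦ "()"), corrupting the text and the
-- extracted subqueries; B leaves the unmatched text as written, which is the intended value.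
def D_extract_subqueries (query : String) : Prop :=
  query.toList.foldl
    (fun (d : Nat) c => if c = '(' then d + 1 else if c = ')' then d - 1 else d) 0 ≠ 0
instance (query : String) : Decidable (D_extract_subqueries query) := by
  unfold D_extract_subqueries; infer_instance

def Spec_extract_subqueries (query : String) (out : String × List String) : Prop :=
  ¬ D_extract_subqueries query → out = extract_subqueries_alt query
instance (query : String) (out : String × List String) : Decidable (Spec_extract_subqueries query out) := by
  unfold Spec_extract_subqueries; infer_instance

def pvDiffWitness_extract_subqueries : String := "("
def pvDiffWitnessOut_extract_subqueries : (String × List String) × (String × List String) :=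
  (("()", []), ("(", []))

-- ===== CLAIM (what is proved, stated in full; the proofs are below) =====
def Claim_unchanged_extract_subqueries : Prop :=
  ∀ (query : String), Dom_extract_subqueries query →
    Spec_extract_subqueries query (extract_subqueries query)
def Claim_changed_extract_subqueries : Prop :=
  Dom_extract_subqueries (pvDiffWitness_extract_subqueries) ∧
  D_extract_subqueries (pvDiffWitness_extract_subqueries) ∧
  extract_subqueries (pvDiffWitness_extract_subqueries) = pvDiffWitnessOut_extract_subqueries.1 ∧
  extract_subqueries_alt (pvDiffWitness_extract_subqueries) = pvDiffWitnessOut_extract_subqueries.2 ∧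
  pvDiffWitnessOut_extract_subqueries.1 ≠ pvDiffWitnessOut_extract_subqueries.2

-- ===== LEMMAS AND PROOFS =====

-- depth step of both scanners
def pstep (d : Int) (c : Char) : Int := if c = '(' then d + 1 else if c = ')' then d - 1 else d

-- number of characters A's matching-paren scan consumes from depth d
def g : List Char → Int → Nat
  | [], _ => 0
  | c :: t, d => if 0 < d then 1 + g t (pstep d c) else 0

theorem g_nonpos (s : List Char) (d : Int) (hd : d ≤ 0) : g s d = 0 := by
  cases s <;> simp [g] <;> omega

theorem aFindF_eq_g : ∀ (fuel : Nat) (q : List Char) (i : Nat) (d : Int),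
    q.length ≤ i + fuel → aFindF fuel q i d = i + g (q.drop i) d := by
  intro fuel
  induction fuel with
  | zero =>
    intro q i d h
    rw [List.drop_eq_nil_of_le (by omega)]
    simp [aFindF, g]
  | succ n ih =>
    intro q i d hle
    rw [aFindF]
    by_cases h : i < q.length ∧ 0 < d
    · rw [dif_pos h, ih q (i + 1) _ (by omega)]
      rw [List.drop_eq_getElem_cons h.1]
      simp [g, h.2, pstep]
      omega
    · rw [dif_neg h]
      rcases Decidable.not_and_iff_or_not.mp h with h1 | h2
      · rw [List.drop_eq_nil_of_le (by omega)]; simp [g]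
      · rw [g_nonpos _ _ (by omega)]; omega

theorem aFind_eq_g (q : List Char) (i : Nat) (d : Int) :
    aFind q i d = i + g (q.drop i) d :=
  aFindF_eq_g _ q i d (by omega)

-- balanced block: what sits between a '(' and its matching ')'
inductive PBal : List Char → Prop
  | nil : PBal []
  | chr {c : Char} {t : List Char} : c ≠ '(' → c ≠ ')' → PBal t → PBal (c :: t)
  | par {b t : List Char} : PBal b → PBal t → PBal ('(' :: b ++ ')' :: t)

-- '(' -free top level, stray ')' allowed: the shape of every query outside D_
inductive PFlat : List Char → Prop
  | nil : PFlat []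
  | chr {c : Char} {t : List Char} : c ≠ '(' → PFlat t → PFlat (c :: t)
  | par {b t : List Char} : PBal b → PFlat t → PFlat ('(' :: b ++ ')' :: t)

theorem g_bal {b : List Char} (hb : PBal b) :
    ∀ (rest : List Char) (d : Int), 0 < d → g (b ++ rest) d = b.length + g rest d := by
  induction hb with
  | nil => simp
  | @chr c t hc1 hc2 _ ih =>
    intro rest d hd
    have e : g ((c :: t) ++ rest) d = 1 + g (t ++ rest) d := by
      simp only [List.cons_append, g, if_pos hd, pstep, if_neg hc1, if_neg hc2]
    rw [e, ih rest d hd]; simp; omega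
  | @par b' t hb' ht ihb iht =>
    intro rest d hd
    have e1 : (('(' :: b' ++ ')' :: t) ++ rest) = '(' :: (b' ++ ')' :: (t ++ rest)) := by simp
    rw [e1]
    have e2 : g ('(' :: (b' ++ ')' :: (t ++ rest))) d = 1 + g (b' ++ ')' :: (t ++ rest)) (d + 1) := by
      simp only [g, if_pos hd]
      rw [show pstep d '(' = d + 1 from by simp [pstep]]
    rw [e2, ihb _ (d + 1) (by omega)]
    have e3 : g (')' :: (t ++ rest)) (d + 1) = 1 + g (t ++ rest) d := by
      simp only [g, if_pos (show (0:Int) < d + 1 by omega)]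
      rw [show pstep (d + 1) ')' = d from by simp [pstep]]
    rw [e3, iht rest d hd]
    simp; omega

-- ---- unfolding lemmas for aRun ----

theorem aRun_end {q : List Char} {i : Nat} {out : List Char} {subs : List String}
    (h : ¬ i < q.length) : aRun q i out subs = (out, subs) := by
  rw [aRun]; simp [h]

theorem aRun_char {q : List Char} {i : Nat} {out : List Char} {subs : List String}
    (h : i < q.length) (hc : q[i] ≠ '(') :
    aRun q i out subs = aRun q (i + 1) (out ++ [q[i]]) subs := by
  rw [aRun]; simp [h, hc]

-- what A produces for one parenthesized block with content b (output piece, updated subqueries)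
def Ablk (b : List Char) (subs : List String) : List Char × List String :=
  let r := aRun b 0 [] subs
  let sidx := PySem.Chars.find (PySem.Chars.lower b) "select".toList
  if sidx ≠ -1 then
    let subs2 := r.2 ++ [String.ofList (PySem.List.slice b (some sidx) none)]
    (PySem.List.slice b none (some sidx) ++
       "<<subquery_".toList ++ PySem.Int.toChars (subs2.length : Int) ++ ">>".toList, subs2)
  else ('(' :: r.1 ++ [')'], r.2)

theorem aRun_open_raw {q : List Char} {i : Nat} {out : List Char} {subs : List String}
    (h : i < q.length) (hc : q[i] = '(') :
    aRun q i out subs =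
      aRun q (i + 1 + g (q.drop (i+1)) 1)
        (out ++ (Ablk ((q.drop (i+1)).take (g (q.drop (i+1)) 1 - 1)) subs).1)
        (Ablk ((q.drop (i+1)).take (g (q.drop (i+1)) 1 - 1)) subs).2 := by
  rw [aRun]
  have hfind : aFind q (i+1) 1 = i + 1 + g (q.drop (i+1)) 1 := by rw [aFind_eq_g]
  simp only [dif_pos h, hc, hfind, eq_self_iff_true, if_true]
  have e : i + 1 + g (q.drop (i+1)) 1 - 1 - (i+1) = g (q.drop (i+1)) 1 - 1 := by omega
  rw [e]
  simp only [Ablk]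
  split_ifs with hs hs2 hs3
  all_goals first | (simp [List.append_assoc]) | (exact absurd hs (by tauto)) | rfl

theorem aRun_shift_aux : ∀ (k : Nat) (q : List Char) (i : Nat), q.length - i ≤ k →
    ∀ (out : List Char) (subs : List String),
      aRun q i out subs = aRun (q.drop i) 0 out subs := by
  intro k
  induction k with
  | zero =>
    intro q i hk out subs
    rw [aRun_end (show ¬ i < q.length by omega), aRun_end (show ¬ 0 < (q.drop i).length by simp only [List.length_drop]; omega)]
  | succ k ih =>
    intro q i hk out subs
    by_cases hi : i < q.length
    · have hdc : q.drop i = q[i] :: q.drop (i+1) := List.drop_eq_getElem_cons hi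
      have h0 : 0 < (q.drop i).length := by simp only [List.length_drop]; omega
      have hg0 : (q.drop i)[0] = q[i] := by simp only [hdc, List.getElem_cons_zero]
      by_cases hc : q[i] = '('
      · have L := aRun_open_raw (out := out) (subs := subs) hi hc
        have R := aRun_open_raw (out := out) (subs := subs) h0 (by rw [hg0]; exact hc)
        have hdd : (q.drop i).drop (0+1) = q.drop (i+1) := by
          rw [List.drop_drop]
        rw [L, R, hdd]
        rw [ih q (i + 1 + g (q.drop (i+1)) 1) (by omega),
            ih (q.drop i) (0 + 1 + g (q.drop (i+1)) 1) (by simp only [List.length_drop]; omega)]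
        rw [List.drop_drop]
        congr 2
        try omega
      · rw [aRun_char hi hc, aRun_char h0 (by rw [hg0]; exact hc)]
        rw [ih q (i+1) (by omega), ih (q.drop i) (0+1) (by simp only [List.length_drop]; omega)]
        rw [List.drop_drop]
        simp only [hg0]
        try congr 1
        try omega
    · rw [aRun_end hi, aRun_end (show ¬ 0 < (q.drop i).length by simp only [List.length_drop]; omega)]

theorem aRun_shift (q : List Char) (i : Nat) (out : List Char) (subs : List String) :
    aRun q i out subs = aRun (q.drop i) 0 out subs :=
  aRun_shift_aux (q.length - i) q i le_rfl out subs

theorem aRun_out_aux : ∀ (k : Nat) (q : List Char) (i : Nat), q.length - i ≤ k →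
    ∀ (out : List Char) (subs : List String),
      aRun q i out subs = (out ++ (aRun q i [] subs).1, (aRun q i [] subs).2) := by
  intro k
  induction k with
  | zero =>
    intro q i hk out subs
    rw [aRun_end (show ¬ i < q.length by omega), aRun_end (show ¬ i < q.length by omega)]
    simp
  | succ k ih =>
    intro q i hk out subs
    by_cases hi : i < q.length
    · by_cases hc : q[i] = '('
      · have L := aRun_open_raw (out := out) (subs := subs) hi hc
        have R := aRun_open_raw (out := []) (subs := subs) hi hc
        simp only [List.nil_append] at R
        conv_lhs => rw [L, ih q (i + 1 + g (q.drop (i+1)) 1) (by omega)]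
        conv_rhs => rw [R, ih q (i + 1 + g (q.drop (i+1)) 1) (by omega)]
        simp
      · have L := aRun_char (out := out) (subs := subs) hi hc
        have R := aRun_char (out := []) (subs := subs) hi hc
        simp only [List.nil_append] at R
        conv_lhs => rw [L, ih q (i+1) (by omega)]
        conv_rhs => rw [R, ih q (i+1) (by omega)]
        simp
    · rw [aRun_end hi]
      simp [aRun_end hi]

theorem aRun_out (q : List Char) (i : Nat) (out : List Char) (subs : List String) :
    aRun q i out subs = (out ++ (aRun q i [] subs).1, (aRun q i [] subs).2) :=
  aRun_out_aux (q.length - i) q i le_rfl out subs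

theorem aRun_open {q : List Char} {i : Nat} {out : List Char} {subs : List String}
    {b rest : List Char} (hd : q.drop i = '(' :: b ++ ')' :: rest) (hb : PBal b) :
    aRun q i out subs =
      aRun q (i + b.length + 2) (out ++ (Ablk b subs).1) (Ablk b subs).2 := by
  have hi : i < q.length := by
    by_contra hge
    rw [List.drop_eq_nil_of_le (by omega)] at hd
    exact (List.cons_ne_nil _ _) hd.symm
  have hdc : q.drop i = q[i] :: q.drop (i+1) := List.drop_eq_getElem_cons hi
  rw [hd] at hdc
  have hc : q[i] = '(' := by
    have := hdc
    simp only [List.cons_append] at this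
    exact (List.cons_eq_cons.mp this).1.symm
  have hdrop : q.drop (i+1) = b ++ ')' :: rest := by
    have := hdc
    simp only [List.cons_append] at this
    exact (List.cons_eq_cons.mp this).2.symm
  have hm : g (q.drop (i+1)) 1 = b.length + 1 := by
    rw [hdrop, g_bal hb _ 1 one_pos]
    have : g (')' :: rest) 1 = 1 + g rest (pstep 1 ')') := by
      simp only [g, if_pos (by norm_num : (0:Int) < 1)]
    rw [this, show pstep 1 ')' = 0 from by simp [pstep], g_nonpos rest 0 le_rfl]
  have hcontent : (q.drop (i+1)).take (g (q.drop (i+1)) 1 - 1) = b := by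
    rw [hm, hdrop]
    simp [List.take_left]
  rw [aRun_open_raw hi hc, hcontent, hm]
  congr 1
  omega

theorem aRun_block0 {b t : List Char} {subs : List String} (hb : PBal b) :
    aRun ('(' :: b ++ ')' :: t) 0 [] subs =
      ((Ablk b subs).1 ++ (aRun t 0 [] (Ablk b subs).2).1,
       (aRun t 0 [] (Ablk b subs).2).2) := by
  have hd : ('(' :: b ++ ')' :: t).drop 0 = '(' :: b ++ ')' :: t := List.drop_zero
  rw [aRun_open hd hb, aRun_shift]
  have e : '(' :: b ++ ')' :: t = ('(' :: b ++ [')']) ++ t := by simp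
  have hlen : 0 + b.length + 2 = ('(' :: b ++ [')']).length := by simp
  rw [e, hlen, List.drop_left, List.nil_append]
  rw [aRun_out t 0 (Ablk b subs).1 (Ablk b subs).2]

-- ---- B simulates A on a balanced block ----

theorem bRun_bal {b : List Char} (hb : PBal b) :
    ∀ (rest : List Char) (cur : List Char × List Char)
      (st : List (List Char × List Char)) (subs : List String),
      bRun (b ++ rest) cur st subs =
        bRun rest (cur.1 ++ (aRun b 0 [] subs).1, cur.2 ++ b) st (aRun b 0 [] subs).2 := by
  induction hb with
  | nil =>
    intro rest cur st subs
    rw [aRun_end (by simp)]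
    simp
  | @chr c t hc1 hc2 ht ih =>
    intro rest cur st subs
    have hstep : bRun ((c :: t) ++ rest) cur st subs
        = bRun (t ++ rest) (cur.1 ++ [c], cur.2 ++ [c]) st subs := by
      rw [List.cons_append, bRun.eq_def]
      simp [hc1, hc2]
    have hA : aRun (c :: t) 0 [] subs
        = ([c] ++ (aRun t 0 [] subs).1, (aRun t 0 [] subs).2) := by
      rw [aRun_char (by simp) (by simpa using hc1), aRun_shift]
      simp only [List.drop_succ_cons, List.drop_zero, List.getElem_cons_zero, List.nil_append]
      rw [aRun_out]
    rw [hstep, ih rest _ st subs, hA]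
    simp
  | @par b1 t hb1 ht ih1 ih2 =>
    intro rest cur st subs
    have e : ('(' :: b1 ++ ')' :: t) ++ rest = '(' :: (b1 ++ (')' :: (t ++ rest))) := by simp
    rw [e]
    have hopen : bRun ('(' :: (b1 ++ ')' :: (t ++ rest))) cur st subs
        = bRun (b1 ++ ')' :: (t ++ rest)) ([], []) (cur :: st) subs := by
      rw [bRun.eq_def]; simp
    rw [hopen, ih1 (')' :: (t ++ rest)) ([], []) (cur :: st) subs]
    have hclose : bRun (')' :: (t ++ rest))
          ([] ++ (aRun b1 0 [] subs).1, [] ++ b1) (cur :: st) (aRun b1 0 [] subs).2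
        = bRun (t ++ rest) (cur.1 ++ (Ablk b1 subs).1, cur.2 ++ ('(' :: b1 ++ [')'])) st
            (Ablk b1 subs).2 := by
      rw [bRun.eq_def]
      simp only [List.nil_append, if_neg (by decide : ¬ (')' : Char) = '('),
        if_pos rfl, Ablk]
      by_cases hs : PySem.Chars.find (PySem.Chars.lower b1) ['s','e','l','e','c','t'] = -1
      · simp [hs]
      · simp [hs, List.append_assoc]
    rw [hclose, ih2 rest _ st (Ablk b1 subs).2, aRun_block0 hb1]
    simp [List.append_assoc]

theorem main_flat {cs : List Char} (hf : PFlat cs) :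
    ∀ (out raw : List Char) (subs : List String),
      bRun cs (out, raw) [] subs = aRun cs 0 out subs := by
  induction hf with
  | nil =>
    intro out raw subs
    rw [aRun_end (by simp)]
    rw [bRun.eq_def, bFinish]
  | @chr c t hc ht ih =>
    intro out raw subs
    have hstep : bRun (c :: t) (out, raw) [] subs
        = bRun t (out ++ [c], raw ++ [c]) [] subs := by
      rw [bRun.eq_def]
      by_cases hcp : c = ')'
      · simp [hc, hcp]
      · simp [hc, hcp]
    rw [hstep, ih, aRun_char (q := c :: t) (i := 0) (by simp) (by simpa using hc)]
    rw [aRun_shift (c :: t) 1]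
    simp
  | @par b t hb ht ih =>
    intro out raw subs
    have e : ('(' :: b ++ ')' :: t) = ('(' :: b ++ [')']) ++ t := by simp
    have hbb : PBal ('(' :: b ++ [')']) := by
      have := PBal.par hb PBal.nil
      simpa using this
    have hA : aRun ('(' :: b ++ [')']) 0 [] subs = Ablk b subs := by
      have h0 := aRun_block0 (t := []) (subs := subs) hb
      rw [aRun_end (show ¬ (0:Nat) < ([] : List Char).length by simp)] at h0
      simpa using h0
    have hdrop : ('(' :: b ++ ')' :: t).drop (0 + b.length + 2) = t := by
      have e2 : '(' :: b ++ ')' :: t = ('(' :: b ++ [')']) ++ t := by simp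
      have hlen : 0 + b.length + 2 = ('(' :: b ++ [')']).length := by simp
      rw [e2, hlen, List.drop_left]
    rw [e, bRun_bal hbb t (out, raw) [] subs, ih, hA]
    rw [show (('(' :: b ++ [')']) ++ t) = '(' :: b ++ ')' :: t from by simp]
    conv_rhs => rw [aRun_open (q := '(' :: b ++ ')' :: t) (i := 0) List.drop_zero hb,
                    aRun_shift ('(' :: b ++ ')' :: t) (0 + b.length + 2), hdrop]

theorem split_cl : ∀ (n : Nat) (t : List Char), t.length ≤ n → ∀ d : Nat,
    t.foldl (fun (d : Nat) c => if c = '(' then d + 1 else if c = ')' then d - 1 else d) (d + 1) = 0 →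
    ∃ b rest, t = b ++ ')' :: rest ∧ PBal b ∧
      rest.foldl (fun (d : Nat) c => if c = '(' then d + 1 else if c = ')' then d - 1 else d) d = 0 := by
  intro n
  induction n with
  | zero =>
    intro t ht d h
    cases t with
    | nil => simp at h
    | cons c t' => simp at ht
  | succ n ih =>
    intro t ht d h
    cases t with
    | nil => simp at h
    | cons c t' =>
      rw [List.foldl_cons] at h
      by_cases h1 : c = '('
      · rw [if_pos h1] at h
        obtain ⟨b1, r1, e1, hb1, hr1⟩ := ih t' (by simpa using ht) (d + 1) h
        obtain ⟨b2, r2, e2, hb2, hr2⟩ := ih r1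
          (by have : t'.length = b1.length + 1 + r1.length := by rw [e1]; simp; omega
              simp at ht; omega) d hr1
        refine ⟨'(' :: b1 ++ ')' :: b2, r2, ?_, PBal.par hb1 hb2, hr2⟩
        subst h1 e1 e2
        simp
      · by_cases h2 : c = ')'
        · rw [if_neg h1, if_pos h2] at h
          exact ⟨[], t', by rw [h2]; simp, PBal.nil, by simpa using h⟩
        · rw [if_neg h1, if_neg h2] at h
          obtain ⟨b, r, e, hbb, hr⟩ := ih t' (by simpa using ht) d h
          exact ⟨c :: b, r, by rw [e]; simp, PBal.chr h1 h2 hbb, hr⟩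

theorem flat_of_cl : ∀ (n : Nat) (t : List Char), t.length ≤ n →
    t.foldl (fun (d : Nat) c => if c = '(' then d + 1 else if c = ')' then d - 1 else d) 0 = 0 →
    PFlat t := by
  intro n
  induction n with
  | zero =>
    intro t ht _
    cases t with
    | nil => exact PFlat.nil
    | cons c t' => simp at ht
  | succ n ih =>
    intro t ht h
    cases t with
    | nil => exact PFlat.nil
    | cons c t' =>
      rw [List.foldl_cons] at h
      by_cases h1 : c = '('
      · rw [if_pos h1] at h
        obtain ⟨b, r, e, hbb, hr⟩ := split_cl n t' (by simpa using ht) 0 h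
        have hfr : PFlat r := ih r
          (by have : t'.length = b.length + 1 + r.length := by rw [e]; simp; omega
              simp at ht; omega) hr
        rw [h1, e]
        exact PFlat.par hbb hfr
      · have h' : t'.foldl
            (fun (d : Nat) c => if c = '(' then d + 1 else if c = ')' then d - 1 else d) 0 = 0 := by
          by_cases h2 : c = ')'
          · rw [if_neg h1, if_pos h2] at h; simpa using h
          · rw [if_neg h1, if_neg h2] at h; exact h
        exact PFlat.chr h1 (ih t' (by simpa using ht) h')

-- ===== VERDICT (by name: the statement is the Claim_ definition above) =====
theorem extract_subqueries_spec : Claim_unchanged_extract_subqueries := by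
  intro query _ hD
  have h0 : query.toList.foldl
      (fun (d : Nat) c => if c = '(' then d + 1 else if c = ')' then d - 1 else d) 0 = 0 := by
    by_contra hne; exact hD hne
  have hf : PFlat query.toList := flat_of_cl query.toList.length query.toList le_rfl h0
  show extract_subqueries query = extract_subqueries_alt query
  unfold extract_subqueries extract_subqueries_alt
  rw [main_flat hf [] [] []]

theorem extract_subqueries_changed : Claim_changed_extract_subqueries := by
  unfold Claim_changed_extract_subqueries
  refine ⟨by decide, by decide, ?_, by decide, by decide⟩
  show extract_subqueries pvDiffWitness_extract_subqueries = ("()", [])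
  have h : pvDiffWitness_extract_subqueries.toList = ['('] := by decide
  have h0 : aRun [] 0 [] ([] : List String) = ([], []) := by rw [aRun]; simp
  have hf : PySem.Chars.find (PySem.Chars.lower ([] : List Char)) ['s','e','l','e','c','t'] = -1 := by decide
  have h1 : aRun ['('] 1 ['(', ')'] [] = (['(', ')'], []) := by rw [aRun]; simp
  simp [extract_subqueries, h]
  rw [aRun]; simp [aFind, aFindF, h0, hf, h1]
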